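-- pv_equiv track=rewrite | github.com/JMarvi3/AdventOfCode | 2015/3.py | get_houses
-- ===== SOURCE A (Python) =====
-- def get_houses(houses, moves):
--     pos = [0, 0]
--     houses.add(tuple(pos))
--     for c in moves:
--         if c == '^':
--             pos[1] += 1
--         elif c == 'v':
--             pos[1] -= 1
--         elif c == '<':
--             pos[0] -= 1
--         elif c == '>':
--             pos[0] += 1
--         houses.add(tuple(pos))
--     return houses
-- ===== SOURCE B (Python) =====
-- def _positions(moves):
--     # divide and conquer: position stream of s1+s2 is the stream of s1 followed by
--     # the stream of s2 (minus its leading origin) translated by s1's endpoint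
--     if len(moves) <= 1:
--         if not moves:
--             return [(0, 0)]
--         d = {'^': (0, 1), 'v': (0, -1), '<': (-1, 0), '>': (1, 0)}.get(moves, (0, 0))
--         return [(0, 0), d]
--     mid = len(moves) // 2
--     left = _positions(moves[:mid])
--     right = _positions(moves[mid:])
--     ox, oy = left[-1]
--     return left + [(ox + x, oy + y) for x, y in right[1:]]
--
--
-- def get_houses(houses, moves):
--     houses.update(_positions(moves))
--     return houses
-- ===== Notes on version B (the rewrite author's own statement) =====
-- stated objective: alternative
-- what changed: B computes the visited-position stream by divide-and-conquer: split the move string in half, recursively compute each half's stream, translate the right half's stream (minus its leading origin) by the left half's endpoint, concatenate, and merge into the set with one update, replacing A's stateful left-to-right walk that mutates a position and adds to the set per character.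
import Mathlib
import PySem

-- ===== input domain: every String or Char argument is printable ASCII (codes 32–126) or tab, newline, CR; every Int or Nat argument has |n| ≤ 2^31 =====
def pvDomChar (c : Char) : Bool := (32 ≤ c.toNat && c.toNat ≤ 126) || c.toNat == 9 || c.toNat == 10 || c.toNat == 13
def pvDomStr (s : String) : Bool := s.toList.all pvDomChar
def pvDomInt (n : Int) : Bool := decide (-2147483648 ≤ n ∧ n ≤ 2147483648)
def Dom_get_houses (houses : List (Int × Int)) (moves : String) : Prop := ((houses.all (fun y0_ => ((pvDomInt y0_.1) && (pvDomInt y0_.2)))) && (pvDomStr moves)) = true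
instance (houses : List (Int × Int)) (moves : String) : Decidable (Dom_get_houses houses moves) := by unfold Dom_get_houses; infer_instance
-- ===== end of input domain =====

-- B replaces A's stateful left-to-right walk with a divide-and-conquer computation of the
-- position stream (right half translated by the left half's endpoint), merged into the set
-- by one update (objective: alternative). Both Pythons mutate the passed-in set; the
-- theorem is about the returned value (which is that same set).

-- ===== PORT A =====
def ghStepA (st : PySem.Set (Int × Int) × (Int × Int)) (c : Char) : PySem.Set (Int × Int) × (Int × Int) :=
  let pos : Int × Int :=
    if c = '^' then (st.2.1, st.2.2 + 1)
    else if c = 'v' then (st.2.1, st.2.2 - 1)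
    else if c = '<' then (st.2.1 - 1, st.2.2)
    else if c = '>' then (st.2.1 + 1, st.2.2)
    else st.2
  (PySem.Set.add st.1 pos, pos)

def get_houses (houses : List (Int × Int)) (moves : String) : List (Int × Int) :=
  (moves.toList.foldl ghStepA (PySem.Set.add houses ((0 : Int), (0 : Int)), ((0 : Int), (0 : Int)))).1

-- ===== PORT B =====
def ghDelta : PySem.Dict Char (Int × Int) :=
  PySem.Dict.ofList [('^', ((0 : Int), (1 : Int))), ('v', (0, -1)), ('<', (-1, 0)), ('>', (1, 0))]

-- _positions of Source B; moves[:mid]/moves[mid:] are List.take/drop, left[-1] is getLast!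
-- (left is never empty), right[1:] is List.drop 1 — each exact here.
def ghPositions (cs : List Char) : List (Int × Int) :=
  if cs.length ≤ 1 then
    match cs with
    | [] => [((0 : Int), (0 : Int))]
    | c :: _ => [((0 : Int), (0 : Int)), PySem.Dict.getD ghDelta c ((0 : Int), (0 : Int))]
  else
    let mid := cs.length / 2
    let left := ghPositions (cs.take mid)
    let right := ghPositions (cs.drop mid)
    let o := left.getLast!
    left ++ (right.drop 1).map (fun q => (o.1 + q.1, o.2 + q.2))
termination_by cs.length
decreasing_by
  · simp only [List.length_take]; omega
  · simp only [List.length_drop]; omega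

def get_houses_alt (houses : List (Int × Int)) (moves : String) : List (Int × Int) :=
  PySem.Set.update houses (ghPositions moves.toList)

-- ===== PRECONDITION & SPEC =====
def Spec_get_houses (houses : List (Int × Int)) (moves : String) (out : List (Int × Int)) : Prop := out = get_houses_alt houses moves
instance (houses : List (Int × Int)) (moves : String) (out : List (Int × Int)) : Decidable (Spec_get_houses houses moves out) := by unfold Spec_get_houses; infer_instance

-- ===== CLAIM (what is proved, stated in full; the proofs are below) =====
def Claim_equal_get_houses : Prop := ∀ (houses : List (Int × Int)) (moves : String), Dom_get_houses houses moves → Spec_get_houses houses moves (get_houses houses moves)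

-- ===== LEMMAS AND PROOFS =====

-- A's per-character position update, isolated.
def ghStepPos (p : Int × Int) (c : Char) : Int × Int :=
  if c = '^' then (p.1, p.2 + 1)
  else if c = 'v' then (p.1, p.2 - 1)
  else if c = '<' then (p.1 - 1, p.2)
  else if c = '>' then (p.1 + 1, p.2)
  else p

-- the stream of positions A visits starting at p
def ghTrace (p : Int × Int) : List Char → List (Int × Int)
  | [] => [p]
  | c :: cs => p :: ghTrace (ghStepPos p c) cs

def ghNet (p : Int × Int) (cs : List Char) : Int × Int := cs.foldl ghStepPos p

theorem ghTrace_ne_nil (p : Int × Int) (cs : List Char) : ghTrace p cs ≠ [] := by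
  cases cs <;> simp [ghTrace]

theorem ghTrace_head (p : Int × Int) (cs : List Char) :
    ghTrace p cs = p :: (ghTrace p cs).tail := by
  cases cs <;> rfl

-- A's fold result: the set after the loop is the initial set updated with the tail of the trace.
theorem ghFoldA (cs : List Char) (s : PySem.Set (Int × Int)) (p : Int × Int) :
    (cs.foldl ghStepA (s, p)).1 = PySem.Set.update s (ghTrace p cs).tail := by
  induction cs generalizing s p with
  | nil => rfl
  | cons c cs ih =>
    have hA : ghStepA (s, p) c = (PySem.Set.add s (ghStepPos p c), ghStepPos p c) := rfl
    simp only [List.foldl_cons, hA, ih, ghTrace, List.tail_cons]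
    rw [ghTrace_head (ghStepPos p c) cs]
    rfl

-- A's branch equals B's delta-table addition.
theorem ghStep_delta (p : Int × Int) (c : Char) :
    ghStepPos p c =
      (p.1 + (PySem.Dict.getD ghDelta c ((0 : Int), (0 : Int))).1,
       p.2 + (PySem.Dict.getD ghDelta c ((0 : Int), (0 : Int))).2) := by
  have he : ghDelta = PySem.Dict.mk [('^', ((0 : Int), (1 : Int))), ('v', (0, -1)), ('<', (-1, 0)), ('>', (1, 0))] := rfl
  by_cases h1 : c = '^'
  · simp [ghStepPos, h1, he, PySem.Dict.getD, PySem.Dict.get?_mk_cons]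
  by_cases h2 : c = 'v'
  · simp [ghStepPos, h2, he, PySem.Dict.getD, PySem.Dict.get?_mk_cons]; omega
  by_cases h3 : c = '<'
  · simp [ghStepPos, h3, he, PySem.Dict.getD, PySem.Dict.get?_mk_cons]; omega
  by_cases h4 : c = '>'
  · simp [ghStepPos, h4, he, PySem.Dict.getD, PySem.Dict.get?_mk_cons]
  have b1 : ('^' == c) = false := beq_eq_false_iff_ne.mpr (Ne.symm h1)
  have b2 : ('v' == c) = false := beq_eq_false_iff_ne.mpr (Ne.symm h2)
  have b3 : ('<' == c) = false := beq_eq_false_iff_ne.mpr (Ne.symm h3)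
  have b4 : ('>' == c) = false := beq_eq_false_iff_ne.mpr (Ne.symm h4)
  simp [ghStepPos, h1, h2, h3, h4, he, PySem.Dict.getD, PySem.Dict.get?, List.find?,
    b1, b2, b3, b4]

-- translation invariance of the step …
theorem ghStep_shift (o p : Int × Int) (c : Char) :
    ghStepPos (o.1 + p.1, o.2 + p.2) c = (o.1 + (ghStepPos p c).1, o.2 + (ghStepPos p c).2) := by
  by_cases h1 : c = '^' <;> by_cases h2 : c = 'v' <;> by_cases h3 : c = '<' <;> by_cases h4 : c = '>' <;>
    simp_all [ghStepPos]
  all_goals omega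

-- … and hence of the trace.
theorem ghTrace_shift (o : Int × Int) (cs : List Char) (p : Int × Int) :
    ghTrace (o.1 + p.1, o.2 + p.2) cs = (ghTrace p cs).map (fun q => (o.1 + q.1, o.2 + q.2)) := by
  induction cs generalizing p with
  | nil => simp [ghTrace]
  | cons c cs ih => simp [ghTrace, ghStep_shift, ih]

theorem gh_getLast!_cons (x : Int × Int) (l : List (Int × Int)) (h : l ≠ []) :
    (x :: l).getLast! = l.getLast! := by
  cases l with
  | nil => exact absurd rfl h
  | cons y t => simp [List.getLast!]

theorem ghTrace_getLast! (cs : List Char) (p : Int × Int) :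
    (ghTrace p cs).getLast! = ghNet p cs := by
  induction cs generalizing p with
  | nil => simp [ghTrace, ghNet, List.getLast!]
  | cons c cs ih =>
    have h := ghTrace_ne_nil (ghStepPos p c) cs
    simp only [ghTrace, ghNet, List.foldl_cons]
    rw [gh_getLast!_cons p _ h]
    exact ih _

-- splitting the trace at any point
theorem ghTrace_append (l r : List Char) (p : Int × Int) :
    ghTrace p (l ++ r) = ghTrace p l ++ (ghTrace (ghNet p l) r).tail := by
  induction l generalizing p with
  | nil =>
    simp only [List.nil_append, ghTrace, ghNet, List.foldl_nil]
    exact ghTrace_head p r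
  | cons c l ih => simp [ghTrace, ghNet, ih]

-- B's divide-and-conquer stream is exactly A's trace from the origin.
theorem ghPositions_eq_trace (cs : List Char) :
    ghPositions cs = ghTrace ((0 : Int), (0 : Int)) cs := by
  rw [ghPositions.eq_def]
  split
  · rename_i h
    match cs, h with
    | [], _ => rfl
    | [c], _ =>
      simp [ghTrace, ghStep_delta ((0 : Int), (0 : Int)) c]
  · rename_i h
    have hl := ghPositions_eq_trace (cs.take (cs.length / 2))
    have hr := ghPositions_eq_trace (cs.drop (cs.length / 2))
    simp only [hl, hr]
    rw [ghTrace_getLast!]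
    set o := ghNet ((0 : Int), (0 : Int)) (cs.take (cs.length / 2)) with ho
    have hshift : (ghTrace ((0 : Int), (0 : Int)) (cs.drop (cs.length / 2))).map
        (fun q => (o.1 + q.1, o.2 + q.2)) = ghTrace o (cs.drop (cs.length / 2)) := by
      have := ghTrace_shift o (cs.drop (cs.length / 2)) ((0 : Int), (0 : Int))
      simpa using this.symm
    calc ghTrace ((0:Int),(0:Int)) (cs.take (cs.length / 2)) ++
          ((ghTrace ((0:Int),(0:Int)) (cs.drop (cs.length / 2))).drop 1).map (fun q => (o.1 + q.1, o.2 + q.2))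
        = ghTrace ((0:Int),(0:Int)) (cs.take (cs.length / 2)) ++
          (ghTrace o (cs.drop (cs.length / 2))).tail := by
          rw [List.map_drop, hshift, List.drop_one]
      _ = ghTrace ((0:Int),(0:Int)) (cs.take (cs.length / 2) ++ cs.drop (cs.length / 2)) :=
          (ghTrace_append _ _ _).symm
      _ = ghTrace ((0:Int),(0:Int)) cs := by rw [List.take_append_drop]
termination_by cs.length
decreasing_by
  · simp only [List.length_take]; omega
  · simp only [List.length_drop]; omega

-- ===== VERDICT (by name: the statement is the Claim_ definition above) =====
theorem get_houses_spec : Claim_equal_get_houses := by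
  intro houses moves _
  unfold Spec_get_houses get_houses get_houses_alt
  rw [ghFoldA, ghPositions_eq_trace, ghTrace_head ((0 : Int), (0 : Int)) moves.toList]
  rfl
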